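-- pv_equiv track=rewrite | github.com/shaperones/At_paper_Feb_2025 | insertions_assembler.py | extract_soft_clipped
-- ===== SOURCE A (Python) =====
-- def extract_soft_clipped(seq, cigar, ref_start):
--     """
--     Extracts soft-clipped sequences from the read.
--     """
--     soft_clipped_seqs = []
--     ref_pos = ref_start
--     query_pos = 0
--
--     # Parse CIGAR string
--     for op, length in cigar:
--         if op == 0:  # Match (M)
--             ref_pos += length
--             query_pos += length
--         elif op == 4:  # Soft-clipping (S)
--             soft_clipped_seq = seq[query_pos:query_pos + length]
--             soft_clipped_seqs.append((ref_pos, soft_clipped_seq))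
--             query_pos += length
--         else:
--             query_pos += length if op in {1, 4} else 0
--             ref_pos += length if op in {0, 2, 3} else 0
--
--     return soft_clipped_seqs
-- ===== SOURCE B (Python) =====
-- def extract_soft_clipped(seq, cigar, ref_start):
--     """
--     Extracts soft-clipped sequences from the read.
--
--     Backwards decomposition: first compute the total reference/query advance of
--     the whole CIGAR, then walk the CIGAR in reverse, subtracting each op's
--     deltas to recover the position in effect before it, collecting soft-clip
--     slices back-to-front and reversing at the end.
--     """
--     r = ref_start + sum(l for op, l in cigar if op in (0, 2, 3))
--     q = sum(l for op, l in cigar if op in (0, 1, 4))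
--     out = []
--     for op, length in reversed(cigar):
--         if op in (0, 2, 3):
--             r -= length
--         if op in (0, 1, 4):
--             q -= length
--         if op == 4:
--             out.append((r, seq[q:q + length]))
--     out.reverse()
--     return out
-- ===== Notes on version B (the rewrite author's own statement) =====
-- stated objective: alternative
-- what changed: Replaced A's forward interleaved accumulate-and-emit loop by a backwards decomposition: two summation passes compute the total ref/query advance, then a reverse scan subtracts each op's deltas to recover its pre-op position and builds the soft-clip list back-to-front, reversed at the end.
import Mathlib
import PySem

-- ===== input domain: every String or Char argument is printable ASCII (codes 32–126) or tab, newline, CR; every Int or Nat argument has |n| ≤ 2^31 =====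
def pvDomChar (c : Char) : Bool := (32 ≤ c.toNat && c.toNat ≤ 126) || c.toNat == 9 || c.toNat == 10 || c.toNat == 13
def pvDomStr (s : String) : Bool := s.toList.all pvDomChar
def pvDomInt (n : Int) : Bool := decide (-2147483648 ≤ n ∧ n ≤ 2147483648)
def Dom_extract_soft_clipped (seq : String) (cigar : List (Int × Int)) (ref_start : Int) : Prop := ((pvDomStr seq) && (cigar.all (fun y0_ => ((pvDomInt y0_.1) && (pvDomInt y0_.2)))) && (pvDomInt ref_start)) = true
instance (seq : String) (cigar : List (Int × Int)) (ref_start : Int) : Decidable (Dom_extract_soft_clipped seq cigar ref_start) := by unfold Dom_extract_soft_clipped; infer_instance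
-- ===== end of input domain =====

-- B walks the CIGAR backwards from the total advance, recovering pre-op positions
-- by subtraction and building the output back-to-front (same cost; objective: alternative).

-- ===== PORT A =====
-- loop body of A's for-loop, over the state (soft_clipped_seqs, ref_pos, query_pos)
def loopA (seq : String) (st : List (Int × String) × Int × Int) (oplen : Int × Int) :
    List (Int × String) × Int × Int :=
  let acc := st.1; let ref_pos := st.2.1; let query_pos := st.2.2
  let op := oplen.1; let length := oplen.2
  if op == 0 then
    (acc, ref_pos + length, query_pos + length)
  else if op == 4 then
    (acc ++ [(ref_pos, PySem.Str.slice seq (some query_pos) (some (query_pos + length)))],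
     ref_pos, query_pos + length)
  else
    (acc,
     ref_pos + (if op == 0 || op == 2 || op == 3 then length else 0),
     query_pos + (if op == 1 || op == 4 then length else 0))

def extract_soft_clipped (seq : String) (cigar : List (Int × Int)) (ref_start : Int) : List (Int × String) :=
  (cigar.foldl (loopA seq) ([], ref_start, 0)).1

-- ===== PORT B =====
-- sum(l for op, l in cigar if op in (0, 2, 3))
def sumRef (cigar : List (Int × Int)) : Int :=
  (cigar.filterMap (fun x => if x.1 == 0 || x.1 == 2 || x.1 == 3 then some x.2 else none)).sum

-- sum(l for op, l in cigar if op in (0, 1, 4))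
def sumQry (cigar : List (Int × Int)) : Int :=
  (cigar.filterMap (fun x => if x.1 == 0 || x.1 == 1 || x.1 == 4 then some x.2 else none)).sum

-- body of B's reverse loop, over the state (r, q, out)
def loopRev (seq : String) (st : Int × Int × List (Int × String)) (oplen : Int × Int) :
    Int × Int × List (Int × String) :=
  let op := oplen.1; let length := oplen.2
  let r := st.1 - (if op == 0 || op == 2 || op == 3 then length else 0)
  let q := st.2.1 - (if op == 0 || op == 1 || op == 4 then length else 0)
  (r, q,
   if op == 4 then
     st.2.2 ++ [(r, PySem.Str.slice seq (some q) (some (q + length)))]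
   else st.2.2)

def extract_soft_clipped_alt (seq : String) (cigar : List (Int × Int)) (ref_start : Int) : List (Int × String) :=
  (cigar.reverse.foldl (loopRev seq) (ref_start + sumRef cigar, sumQry cigar, [])).2.2.reverse

-- ===== PRECONDITION & SPEC =====
def Spec_extract_soft_clipped (seq : String) (cigar : List (Int × Int)) (ref_start : Int) (out : List (Int × String)) : Prop := out = extract_soft_clipped_alt seq cigar ref_start
instance (seq : String) (cigar : List (Int × Int)) (ref_start : Int) (out : List (Int × String)) : Decidable (Spec_extract_soft_clipped seq cigar ref_start out) := by unfold Spec_extract_soft_clipped; infer_instance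

-- ===== CLAIM (what is proved, stated in full; the proofs are below) =====
def Claim_equal_extract_soft_clipped : Prop := ∀ (seq : String) (cigar : List (Int × Int)) (ref_start : Int), Dom_extract_soft_clipped seq cigar ref_start → Spec_extract_soft_clipped seq cigar ref_start (extract_soft_clipped seq cigar ref_start)

-- ===== LEMMAS AND PROOFS =====

-- Recursive characterisation of A's loop result (from empty accumulator).
def fA (seq : String) : List (Int × Int) → Int → Int → List (Int × String)
  | [], _, _ => []
  | (op, length) :: cs, r, q =>
    if op == 0 then fA seq cs (r + length) (q + length)
    else if op == 4 then
      (r, PySem.Str.slice seq (some q) (some (q + length))) :: fA seq cs r (q + length)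
    else
      fA seq cs (r + (if op == 0 || op == 2 || op == 3 then length else 0))
                (q + (if op == 1 || op == 4 then length else 0))

theorem loopA_match (seq : String) (acc : List (Int × String)) (r q op length : Int)
    (h : op = 0) : loopA seq (acc, r, q) (op, length) = (acc, r + length, q + length) := by
  simp [loopA, h]

theorem loopA_soft (seq : String) (acc : List (Int × String)) (r q op length : Int)
    (h : op = 4) :
    loopA seq (acc, r, q) (op, length)
      = (acc ++ [(r, PySem.Str.slice seq (some q) (some (q + length)))], r, q + length) := by
  simp [loopA, h]

theorem loopA_other (seq : String) (acc : List (Int × String)) (r q op length : Int)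
    (h0 : ¬ op = 0) (h4 : ¬ op = 4) :
    loopA seq (acc, r, q) (op, length)
      = (acc, r + (if op == 0 || op == 2 || op == 3 then length else 0),
              q + (if op == 1 || op == 4 then length else 0)) := by
  simp [loopA, h0, h4]

theorem foldA_eq (seq : String) (cigar : List (Int × Int)) :
    ∀ (acc : List (Int × String)) (r q : Int),
      (cigar.foldl (loopA seq) (acc, r, q)).1 = acc ++ fA seq cigar r q := by
  induction cigar with
  | nil => intro acc r q; simp [fA]
  | cons hd tl ih =>
    intro acc r q
    obtain ⟨op, length⟩ := hd
    rw [List.foldl_cons]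
    by_cases h0 : op = 0
    · rw [loopA_match seq acc r q op length h0, ih, fA]
      simp [h0]
    · by_cases h4 : op = 4
      · rw [loopA_soft seq acc r q op length h4, ih, fA]
        simp [h0, h4]
      · rw [loopA_other seq acc r q op length h0 h4, ih, fA]
        simp [h0, h4]

-- per-op deltas
def dRef (op length : Int) : Int := if op == 0 || op == 2 || op == 3 then length else 0
def dQry (op length : Int) : Int := if op == 0 || op == 1 || op == 4 then length else 0

theorem sumRef_cons (op length : Int) (cs : List (Int × Int)) :
    sumRef ((op, length) :: cs) = dRef op length + sumRef cs := by
  simp only [sumRef, dRef, List.filterMap_cons]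
  split_ifs <;> simp

theorem sumQry_cons (op length : Int) (cs : List (Int × Int)) :
    sumQry ((op, length) :: cs) = dQry op length + sumQry cs := by
  simp only [sumQry, dQry, List.filterMap_cons]
  split_ifs <;> simp

theorem loopRev_eq (seq : String) (r q : Int) (acc : List (Int × String)) (op length : Int) :
    loopRev seq (r, q, acc) (op, length)
      = (r - dRef op length, q - dQry op length,
         if op == 4 then
           acc ++ [(r - dRef op length,
                    PySem.Str.slice seq (some (q - dQry op length))
                      (some (q - dQry op length + length)))]
         else acc) := rfl

-- Key invariant: the reverse fold started at the post-cigar position recovers fA, reversed.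
theorem foldRev_eq (seq : String) (cigar : List (Int × Int)) :
    ∀ (r q : Int) (acc : List (Int × String)),
      cigar.reverse.foldl (loopRev seq) (r + sumRef cigar, q + sumQry cigar, acc)
        = (r, q, acc ++ (fA seq cigar r q).reverse) := by
  induction cigar with
  | nil => intro r q acc; simp [fA, sumRef, sumQry]
  | cons hd tl ih =>
    intro r q acc
    obtain ⟨op, length⟩ := hd
    rw [List.reverse_cons, List.foldl_append, sumRef_cons, sumQry_cons,
        show r + (dRef op length + sumRef tl) = (r + dRef op length) + sumRef tl by ring,
        show q + (dQry op length + sumQry tl) = (q + dQry op length) + sumQry tl by ring,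
        ih]
    rw [List.foldl_cons, List.foldl_nil, loopRev_eq]
    by_cases h4 : op = 4
    · subst h4
      simp [fA, dRef, dQry]
    · by_cases h0 : op = 0
      · subst h0
        simp [fA, dRef, dQry]
      · have hq : dQry op length = if op == 1 || op == 4 then length else 0 := by
          simp [dQry, h0]
        simp [fA, h0, h4, dRef, hq]

-- ===== VERDICT (by name: the statement is the Claim_ definition above) =====
theorem extract_soft_clipped_spec : Claim_equal_extract_soft_clipped := by
  intro seq cigar ref_start _
  show extract_soft_clipped seq cigar ref_start = extract_soft_clipped_alt seq cigar ref_start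
  unfold extract_soft_clipped extract_soft_clipped_alt
  rw [show (sumQry cigar) = 0 + sumQry cigar by ring, foldRev_eq, foldA_eq]
  simp
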